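-- pv_equiv track=rewrite | github.com/JungDaeJin23/algorithm-study | Programmers/Level2/07_stock_price/s1.py | solution
-- ===== SOURCE A (Python) =====
-- def solution(prices):
--     stack = prices[:]
--     top = -1
--     answer = prices[:]
--
--     # time == idx
--     for time, price in enumerate(prices):
--         if top == -1:  # is_empty
--             top += 1
--             stack[top] = (price, time)
--         else:
--             # 한번만 비교하고 말아서 틀렸었다.
--             # cmp_price, cmp_time = stack[top]
--             # if price >= cmp_price:
--             #     top += 1
--             #     stack[top] = (price, time)
--             # else:
--             #     while True:
--             #         answer[cmp_time] = time - cmp_time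
--             #         stack[top] = (price, time)
--             # 조건이 만족한다면 한개가 아니라 stack top == -1 까지 비교해야됨
--             while top != -1:
--                 cmp_price, cmp_time = stack[top]
--                 if price >= cmp_price:
--                     top += 1
--                     stack[top] = (price, time)
--                     break
--                 else:
--                     answer[cmp_time] = time - cmp_time
--                     top -= 1
--             else:
--                 top += 1
--                 stack[top] = (price, time)
--
--     max_time = len(prices) - 1
--     while top != -1:
--         price, time = stack[top]
--         top -= 1
--         answer[time] = max_time - time
--
--     return answer
-- ===== SOURCE B (Python) =====
-- def solution(prices):
--     n = len(prices)
--     answer = [0] * n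
--     for i in range(n):
--         cnt = 0
--         for j in range(i + 1, n):
--             cnt += 1
--             if prices[j] < prices[i]:
--                 break
--         answer[i] = cnt
--     return answer
-- ===== Notes on version B (the rewrite author's own statement) =====
-- stated objective: simpler
-- what changed: Replaced the index-pointer monotonic stack (array reused as stack storage, top pointer, pop loop with while/else, final drain) by the direct quadratic definition: for each index count forward until the first strictly smaller price.
import Mathlib
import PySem

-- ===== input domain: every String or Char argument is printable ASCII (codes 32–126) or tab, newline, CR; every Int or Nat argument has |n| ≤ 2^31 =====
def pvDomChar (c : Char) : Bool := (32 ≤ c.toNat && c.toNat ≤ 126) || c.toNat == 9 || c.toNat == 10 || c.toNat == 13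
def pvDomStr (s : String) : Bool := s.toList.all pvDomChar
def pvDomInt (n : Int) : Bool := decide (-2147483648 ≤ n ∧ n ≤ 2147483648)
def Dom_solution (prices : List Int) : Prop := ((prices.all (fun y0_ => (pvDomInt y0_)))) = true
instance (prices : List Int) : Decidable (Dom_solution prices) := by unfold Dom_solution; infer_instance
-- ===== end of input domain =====

-- B replaces A's linear-time monotonic stack by the plain quadratic scan (simpler, not faster):
-- for each index, count forward to the first strictly smaller price.
-- Port note: A's array reused as stack storage plus top pointer is ported as a cons list whose
-- head is the top — only the top cell is ever read or written, and the initial integer contents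
-- of `stack = prices[:]` are never read, so this is exact.

-- ===== PORT A =====
-- A's inner `while top != -1: … break / else:` loop: pop while price < top (recording answers), then push
def popLoop (price time : Int) : List (Int × Int) → List Int → List (Int × Int) × List Int
  | [], ans => ([(price, time)], ans)
  | (cp, ct) :: rest, ans =>
      if cp ≤ price then ((price, time) :: (cp, ct) :: rest, ans)
      else popLoop price time rest (PySem.List.pySetD ans ct (time - ct))

-- A's main body: the enumerate loop, then the final drain `while top != -1`
def solution (prices : List Int) : List Int :=
  let res := (PySem.List.enumerate prices 0).foldl
    (fun (st : List (Int × Int) × List Int) (tp : Int × Int) =>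
      if st.1 = [] then ((tp.2, tp.1) :: st.1, st.2)
      else popLoop tp.2 tp.1 st.1 st.2)
    ([], prices)
  let maxTime : Int := PySem.List.len prices - 1
  res.1.foldl (fun ans pt => PySem.List.pySetD ans pt.2 (maxTime - pt.2)) res.2

-- ===== PORT B =====
-- B's inner loop: count forward, stopping after the first strictly smaller price
def countForward (p : Int) : List Int → Int
  | [] => 0
  | q :: qs => if q < p then 1 else 1 + countForward p qs

-- B's outer loop: one answer entry per index, scanning the tail
def solution_alt : List Int → List Int
  | [] => []
  | p :: rest => countForward p rest :: solution_alt rest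

-- ===== PRECONDITION & SPEC =====
def Spec_solution (prices : List Int) (out : List Int) : Prop := out = solution_alt prices
instance (prices : List Int) (out : List Int) : Decidable (Spec_solution prices out) := by unfold Spec_solution; infer_instance

-- ===== CLAIM (what is proved, stated in full; the proofs are below) =====
def Claim_equal_solution : Prop := ∀ (prices : List Int), Dom_solution prices → Spec_solution prices (solution prices)

-- ===== LEMMAS AND PROOFS =====

-- the value B computes for index i: the count over the tail after i
def specF (prices : List Int) (i : Nat) : Int :=
  countForward (prices.getD i 0) (prices.drop (i + 1))

-- a stack cell of A's run: (price at index i, time i)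
def stackEntry (prices : List Int) (i : Nat) : Int × Int := (prices.getD i 0, (i : Int))

-- invariant of A's main loop after processing times 0..t-1: the stack holds (in decreasing
-- index order) exactly the indices whose strictly-smaller successor has not appeared yet,
-- and every other processed index already carries B's value in `answer`
def StkInv (prices : List Int) (t : Nat) (st : List (Int × Int) × List Int) : Prop :=
  ∃ idxs : List Nat,
    st.1 = idxs.map (stackEntry prices) ∧
    idxs.Pairwise (fun a b => b < a) ∧
    (∀ i ∈ idxs, i < t) ∧
    (∀ i ∈ idxs, ∀ j, i < j → j < t → prices.getD i 0 ≤ prices.getD j 0) ∧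
    st.2.length = prices.length ∧
    (∀ i, i < t → i ∉ idxs → st.2.getD i 0 = specF prices i)

lemma countForward_first (p : Int) (l : List Int) (k : Nat) (hk : k < l.length)
    (hb : ∀ j, j < k → p ≤ l.getD j 0) (ha : l.getD k 0 < p) :
    countForward p l = (k : Int) + 1 := by
  induction l generalizing k with
  | nil => simp at hk
  | cons q qs ih =>
    cases k with
    | zero => simp only [List.getD_cons_zero] at ha; simp [countForward, ha]
    | succ k =>
      have hq : p ≤ q := hb 0 (Nat.succ_pos k)
      simp only [List.getD_cons_succ] at ha
      simp only [countForward, if_neg (not_lt.mpr hq)]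
      rw [ih k (by simpa using hk) (fun j hj => by simpa using hb (j+1) (by omega)) ha]
      push_cast; ring

lemma countForward_all (p : Int) (l : List Int) (h : ∀ x ∈ l, p ≤ x) :
    countForward p l = (l.length : Int) := by
  induction l with
  | nil => rfl
  | cons q qs ih =>
    have hq := h q (List.mem_cons_self ..)
    simp [countForward, if_neg (not_lt.mpr hq),
      ih (fun x hx => h x (List.mem_cons_of_mem _ hx))]
    ring

lemma getD_drop (l : List Int) (i j : Nat) :
    (l.drop i).getD j 0 = l.getD (i + j) 0 := by
  simp [List.getD_eq_getElem?_getD, List.getElem?_drop]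

lemma popLoop_inv (prices : List Int) (t : Nat) (q : Int) (ht : t < prices.length)
    (hq : prices.getD t 0 = q) :
    ∀ (idxs : List Nat) (ans : List Int),
      idxs.Pairwise (fun a b => b < a) →
      (∀ i ∈ idxs, i < t) →
      (∀ i ∈ idxs, ∀ j, i < j → j < t → prices.getD i 0 ≤ prices.getD j 0) →
      ans.length = prices.length →
      (∀ i, i < t → i ∉ idxs → ans.getD i 0 = specF prices i) →
      StkInv prices (t + 1) (popLoop q (t : Int) (idxs.map (stackEntry prices)) ans) := by
  intro idxs
  induction idxs with
  | nil =>
    intro ans _ _ _ hlen hans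
    refine ⟨[t], ?_, ?_, ?_, ?_, ?_, ?_⟩
    · simp [popLoop, stackEntry, - List.getD_eq_getElem?_getD, hq]
    · simp
    · simp
    · intro i hi j hij hj; simp at hi; omega
    · simpa [popLoop]
    · intro i hi hni
      simp at hni
      exact hans i (by omega) (by simp)
  | cons h tl ih =>
    intro ans hpw hbnd h4 hlen hans
    obtain ⟨hpw1, hpw2⟩ := List.pairwise_cons.mp hpw
    have hh : h < t := hbnd h (by simp)
    by_cases hle : prices.getD h 0 ≤ q
    · -- break: push on top
      have hres : popLoop q (t : Int) ((h :: tl).map (stackEntry prices)) ans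
          = ((q, (t : Int)) :: (h :: tl).map (stackEntry prices), ans) := by
        simp only [List.map_cons, popLoop, stackEntry]
        rw [if_pos (by simpa [← List.getD_eq_getElem?_getD] using hle)]
      refine ⟨t :: h :: tl, ?_, ?_, ?_, ?_, ?_, ?_⟩
      · rw [hres]; simp [stackEntry, - List.getD_eq_getElem?_getD, hq]
      · refine List.pairwise_cons.mpr ⟨?_, hpw⟩
        intro b hb
        rcases List.mem_cons.mp hb with rfl | hb
        · exact hh
        · exact lt_trans (hpw1 b hb) hh
      · intro i hi
        rcases List.mem_cons.mp hi with rfl | hi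
        · omega
        · exact lt_trans (hbnd i hi) (by omega)
      · intro i hi j hij hj
        by_cases hjt : j < t
        · rcases List.mem_cons.mp hi with rfl | hi
          · omega
          · exact h4 i hi j hij hjt
        · have hj' : j = t := by omega
          subst hj'
          rw [hq]
          rcases List.mem_cons.mp hi with rfl | hi
          · omega
          · rcases List.mem_cons.mp hi with rfl | hitl
            · exact hle
            · exact le_trans (h4 i (by simp [hitl]) h (hpw1 i hitl) hh) hle
      · rw [hres]; exact hlen
      · intro i hi hni
        simp only [List.mem_cons, not_or] at hni
        rw [hres]
        exact hans i (by omega) (by simp [hni.2.1, hni.2.2])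
    · -- pop h, set answer[h] = t - h, recurse
      rw [not_le] at hle
      have hstep : popLoop q (t : Int) ((h :: tl).map (stackEntry prices)) ans
          = popLoop q (t : Int) (tl.map (stackEntry prices)) (ans.set h ((t : Int) - (h : Int))) := by
        simp only [List.map_cons, popLoop, stackEntry]
        rw [if_neg (by simpa [← List.getD_eq_getElem?_getD] using not_le.mpr hle)]
        congr 1
        rw [PySem.List.pySetD_natCast]
      rw [hstep]
      apply ih (ans.set h ((t : Int) - (h : Int))) hpw2
        (fun i hi => hbnd i (List.mem_cons_of_mem _ hi))
        (fun i hi => h4 i (List.mem_cons_of_mem _ hi))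
        (by simpa using hlen)
      intro i hit hni
      by_cases hih : i = h
      · subst hih
        have hset : (ans.set i ((t : Int) - (i : Int))).getD i 0 = (t : Int) - (i : Int) := by
          simp [List.getD_eq_getElem?_getD, show i < ans.length by omega]
        rw [hset, specF,
          countForward_first (prices.getD i 0) (prices.drop (i + 1)) (t - i - 1)
            (by simp [List.length_drop]; omega)
            (fun j hj => by
              rw [getD_drop]
              exact h4 i (by simp) (i + 1 + j) (by omega) (by omega))
            (by rw [getD_drop, show i + 1 + (t - i - 1) = t by omega]; omega)]
        omega
      · rw [show (ans.set h ((t : Int) - (h : Int))).getD i 0 = ans.getD i 0 by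
          simp [List.getD_eq_getElem?_getD,
            List.getElem?_set_ne (show h ≠ i from fun e => hih e.symm)]]
        exact hans i hit (by simp [hih, hni])

lemma fold_inv (prices : List Int) :
    ∀ (l : List Int) (t : Nat) (st : List (Int × Int) × List Int),
      prices.drop t = l → StkInv prices t st →
      StkInv prices (t + l.length)
        ((PySem.List.enumerate l (t : Int)).foldl
          (fun (st : List (Int × Int) × List Int) (tp : Int × Int) =>
            if st.1 = [] then ((tp.2, tp.1) :: st.1, st.2)
            else popLoop tp.2 tp.1 st.1 st.2) st) := by
  intro l
  induction l with
  | nil => intro t st _ hInv; simpa [PySem.List.enumerate] using hInv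
  | cons q l' ih =>
    intro t st hdrop hInv
    have hq? : prices[t]? = some q := by
      rw [show t = t + 0 by omega, ← List.getElem?_drop, hdrop]
      rfl
    have ht : t < prices.length := by
      have := List.getElem?_eq_some_iff.mp hq?
      exact this.1
    have hq : prices.getD t 0 = q := by
      simp [List.getD_eq_getElem?_getD, hq?]
    obtain ⟨idxs, h1, h2, h3, h4, h5, h6⟩ := hInv
    rw [PySem.List.enumerate_cons, List.foldl_cons]
    have hone : (if st.1 = [] then ((((t : Int), q).2, ((t : Int), q).1) :: st.1, st.2)
            else popLoop ((t : Int), q).2 ((t : Int), q).1 st.1 st.2)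
        = popLoop q (t : Int) (idxs.map (stackEntry prices)) st.2 := by
      rw [h1]
      cases idxs with
      | nil => simp [popLoop]
      | cons a b => simp [popLoop]
    rw [hone]
    have hInv' := popLoop_inv prices t q ht hq idxs st.2 h2 h3 h4 h5 h6
    have hdrop' : prices.drop (t + 1) = l' := by
      have : prices.drop (t + 1) = (prices.drop t).drop 1 := by
        rw [List.drop_drop]
      rw [this, hdrop]; rfl
    have := ih (t + 1) _ hdrop' hInv'
    rw [show ((t : Int) + 1) = ((t + 1 : Nat) : Int) by push_cast; ring,
      show t + (q :: l').length = (t + 1) + l'.length by simp; omega]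
    exact this

lemma drain_inv (prices : List Int) :
    ∀ (idxs : List Nat) (ans : List Int),
      (∀ i ∈ idxs, i < prices.length) →
      (∀ i ∈ idxs, ∀ j, i < j → j < prices.length →
        prices.getD i 0 ≤ prices.getD j 0) →
      ans.length = prices.length →
      (∀ i, i < prices.length → i ∉ idxs → ans.getD i 0 = specF prices i) →
      ((idxs.map (stackEntry prices)).foldl
          (fun ans pt => PySem.List.pySetD ans pt.2 ((PySem.List.len prices - 1) - pt.2)) ans).length
        = prices.length ∧
      ∀ i, i < prices.length →
        ((idxs.map (stackEntry prices)).foldl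
          (fun ans pt => PySem.List.pySetD ans pt.2 ((PySem.List.len prices - 1) - pt.2)) ans).getD i 0
        = specF prices i := by
  intro idxs
  induction idxs with
  | nil =>
    intro ans _ _ hlen hans
    exact ⟨hlen, fun i hi => hans i hi (by simp)⟩
  | cons h tl ih =>
    intro ans hbnd h4 hlen hans
    have hh : h < prices.length := hbnd h (by simp)
    have hstep : (((h :: tl).map (stackEntry prices)).foldl
          (fun ans pt => PySem.List.pySetD ans pt.2 ((PySem.List.len prices - 1) - pt.2)) ans)
        = ((tl.map (stackEntry prices)).foldl
          (fun ans pt => PySem.List.pySetD ans pt.2 ((PySem.List.len prices - 1) - pt.2))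
          (ans.set h ((PySem.List.len prices - 1) - (h : Int)))) := by
      simp only [List.map_cons, List.foldl_cons, stackEntry, PySem.List.pySetD_natCast]
    rw [hstep]
    apply ih
    · exact fun i hi => hbnd i (List.mem_cons_of_mem _ hi)
    · exact fun i hi => h4 i (List.mem_cons_of_mem _ hi)
    · simpa using hlen
    intro i hi hni
    by_cases hih : i = h
    · subst hih
      rw [show (ans.set i ((PySem.List.len prices - 1) - (i : Int))).getD i 0
          = (PySem.List.len prices - 1) - (i : Int) by
        simp [List.getD_eq_getElem?_getD, show i < ans.length by omega]]
      rw [specF, countForward_all]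
      · simp [PySem.List.len_eq]
        omega
      · intro x hx
        obtain ⟨j, hj, hx⟩ := List.mem_iff_getElem.mp hx
        have hjlen : j < prices.length - (i + 1) := by simpa using hj
        have hx2 : prices.getD (i + 1 + j) 0 = x := by
          rw [← getD_drop, List.getD_eq_getElem?_getD, List.getElem?_eq_getElem hj, hx]
          rfl
        rw [← hx2]
        exact h4 i (by simp) (i + 1 + j) (by omega) (by omega)
    · rw [show (ans.set h ((PySem.List.len prices - 1) - (h : Int))).getD i 0 = ans.getD i 0 by
        simp [List.getD_eq_getElem?_getD,
          List.getElem?_set_ne (show h ≠ i from fun e => hih e.symm)]]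
      exact hans i hi (by simp [hih, hni])

lemma alt_eq_map (prices : List Int) :
    solution_alt prices = (List.range prices.length).map (specF prices) := by
  induction prices with
  | nil => rfl
  | cons p rest ih =>
    simp only [solution_alt, List.length_cons, List.range_succ_eq_map, List.map_cons,
      List.map_map, ih]
    congr 1

lemma a_eq_b (prices : List Int) : solution prices = solution_alt prices := by
  have h0 : StkInv prices 0 (([] : List (Int × Int)), prices) := by
    exact ⟨[], by simp, by simp, by simp, by simp, rfl, by omega⟩
  have hfold := fold_inv prices prices 0 (([] : List (Int × Int)), prices) (by simp) h0
  rw [show ((0 : Nat) : Int) = (0 : Int) by rfl] at hfold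
  obtain ⟨idxs, h1, h2, h3, h4, h5, h6⟩ := hfold
  have hdrain := drain_inv prices idxs _
    (fun i hi => by simpa using h3 i hi)
    (fun i hi j hij hj => h4 i hi j hij (by simpa using hj))
    h5
    (fun i hi hni => h6 i (by simpa using hi) hni)
  rw [solution, alt_eq_map]
  apply List.ext_getElem
  · rw [← h1] at hdrain
    simpa using hdrain.1
  · intro i hi hi2
    rw [← h1] at hdrain
    have := hdrain.2 i (by simpa using hi2)
    rw [List.getD_eq_getElem?_getD, List.getElem?_eq_getElem hi] at this
    simpa using this

-- ===== VERDICT (by name: the statement is the Claim_ definition above) =====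
theorem solution_spec : Claim_equal_solution := by
  intro prices _
  exact a_eq_b prices
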